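-- pv_equiv track=rewrite | github.com/rdas3-bths/Advent2015 | Day5-2015.py | check_triple_letter_pattern
-- ===== SOURCE A (Python) =====
-- def check_triple_letter_pattern(input):
--     i = 0
--     while i < len(input) - 2:
--         sub = input[i:i+3]
--         if sub[0] == sub[2]:
--             return True
--         i += 1
--     return False
-- ===== SOURCE B (Python) =====
-- import re
--
-- def check_triple_letter_pattern(input):
--     # regex engine: first capture any char, any gap char, then backreference
--     # two positions later; DOTALL so '\n' is treated like any other char.
--     return re.search(r'(.).\1', input, re.DOTALL) is not None
-- ===== Notes on version B (the rewrite author's own statement) =====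
-- stated objective: idiomatic
-- what changed: Replaces A's manual while-loop over 3-character slices with a single re.search of the backreference pattern '(.).\1' (with DOTALL), delegating the x_x scan to the regex engine and coercing the match object to a bool.
import Mathlib
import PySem

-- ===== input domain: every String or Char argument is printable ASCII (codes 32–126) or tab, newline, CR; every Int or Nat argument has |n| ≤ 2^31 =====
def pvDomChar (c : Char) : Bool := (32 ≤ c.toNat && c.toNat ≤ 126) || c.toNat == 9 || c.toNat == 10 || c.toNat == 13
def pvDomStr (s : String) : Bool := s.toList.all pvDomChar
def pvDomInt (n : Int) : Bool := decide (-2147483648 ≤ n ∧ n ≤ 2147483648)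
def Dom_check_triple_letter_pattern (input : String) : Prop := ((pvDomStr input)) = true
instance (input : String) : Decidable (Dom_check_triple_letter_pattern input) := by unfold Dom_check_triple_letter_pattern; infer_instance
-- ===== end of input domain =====

-- B replaces A's manual while-loop over 3-char slices with re.search of the
-- backreference pattern '(.).\1' under DOTALL (idiomatic; same cost).

-- ===== PORT A =====
-- while i < len(input) - 2: sub = input[i:i+3]; if sub[0] == sub[2]: return True; i += 1
def checkLoopA (l : List Char) (i : Nat) : Bool :=
  if i + 2 < l.length then
    let sub := PySem.List.slice l (some (i : Int)) (some ((i : Int) + 3))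
    if PySem.List.pyGet? sub 0 == PySem.List.pyGet? sub 2 then true
    else checkLoopA l (i + 1)
  else false
termination_by l.length - i

def check_triple_letter_pattern (input : String) : Bool :=
  checkLoopA input.toList 0

-- ===== PORT B =====
-- re.search(r'(.).\1', input, re.DOTALL) is not None.
-- No regex library exists in Lean/Mathlib, so the fixed pattern's search is
-- ported by hand, exactly as the engine runs it: try each start position i in
-- order; the pattern '(.).\1' (DOTALL) matches at i iff characters exist at
-- i, i+1 and i+2 and the one at i equals the one at i+2; the search succeeds
-- iff some start position matches.
def check_triple_letter_pattern_alt (input : String) : Bool :=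
  (List.range input.toList.length).any (fun i =>
    match input.toList[i]?, input.toList[i+1]?, input.toList[i+2]? with
    | some a, some _, some c => a == c
    | _, _, _ => false)

-- ===== PRECONDITION & SPEC =====
def Spec_check_triple_letter_pattern (input : String) (out : Bool) : Prop := out = check_triple_letter_pattern_alt input
instance (input : String) (out : Bool) : Decidable (Spec_check_triple_letter_pattern input out) := by unfold Spec_check_triple_letter_pattern; infer_instance

-- ===== CLAIM (what is proved, stated in full; the proofs are below) =====
def Claim_equal_check_triple_letter_pattern : Prop := ∀ (input : String), Dom_check_triple_letter_pattern input → Spec_check_triple_letter_pattern input (check_triple_letter_pattern input)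

-- ===== LEMMAS AND PROOFS =====

-- A's loop from index i finds a pair iff some j ≥ i has l[j] = l[j+2].
theorem checkLoopA_iff (l : List Char) (k i : Nat) (hk : l.length ≤ i + k) :
    checkLoopA l i = true ↔ ∃ j, i ≤ j ∧ ∃ h : j + 2 < l.length, l[j]'(by omega) = l[j+2]'h := by
  induction k generalizing i with
  | zero =>
    rw [checkLoopA]
    have h : ¬ (i + 2 < l.length) := by omega
    simp only [h, if_false]
    constructor
    · intro hc; exact absurd hc (by simp)
    · rintro ⟨j, hij, hj, _⟩; omega
  | succ k ih =>
    rw [checkLoopA]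
    by_cases h : i + 2 < l.length
    · have h0 : i < l.length := by omega
      have hs : PySem.List.slice l (some (i : Int)) (some ((i : Int) + 3))
          = (l.drop i).take 3 := by
        have : ((i : Int) + 3) = ((i + 3 : Nat) : Int) := by push_cast; ring
        rw [this, PySem.List.slice_natCast]
        norm_num
      have hg0 : PySem.List.pyGet? ((l.drop i).take 3) 0 = some (l[i]'h0) := by
        rw [PySem.List.pyGet?_zero]
        simp [h0]
      have hg2 : PySem.List.pyGet? ((l.drop i).take 3) 2 = some (l[i+2]'h) := by
        have := PySem.List.pyGet?_natCast ((l.drop i).take 3) (2 : Nat)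
        norm_num at this
        rw [this]
        simp [h]
      simp only [h, if_true, hs, hg0, hg2]
      by_cases he : l[i]'h0 = l[i+2]'h
      · simp only [he]
        constructor
        · intro _; exact ⟨i, le_refl i, h, he⟩
        · intro _; simp
      · have : (some (l[i]'h0) == some (l[i+2]'h)) = false := by
          simp [he]
        simp only [this, Bool.false_eq_true, if_false]
        rw [ih (i+1) (by omega)]
        constructor
        · rintro ⟨j, hij, hj, hjeq⟩; exact ⟨j, by omega, hj, hjeq⟩
        · rintro ⟨j, hij, hj, hjeq⟩
          refine ⟨j, ?_, hj, hjeq⟩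
          rcases Nat.eq_or_lt_of_le hij with rfl | hlt
          · exact absurd hjeq he
          · omega
    · simp only [h, if_false]
      constructor
      · intro hc; exact absurd hc (by simp)
      · rintro ⟨j, hij, hj, _⟩; omega

-- B's position-by-position search finds a match iff some j has l[j] = l[j+2].
theorem altB_iff (l : List Char) :
    ((List.range l.length).any (fun i =>
      match l[i]?, l[i+1]?, l[i+2]? with
      | some a, some _, some c => a == c
      | _, _, _ => false)) = true
    ↔ ∃ j, 0 ≤ j ∧ ∃ h : j + 2 < l.length, l[j]'(by omega) = l[j+2]'h := by
  rw [List.any_eq_true]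
  constructor
  · rintro ⟨i, hi, hmatch⟩
    rw [List.mem_range] at hi
    by_cases h2 : i + 2 < l.length
    · have h1 : i + 1 < l.length := by omega
      rw [List.getElem?_eq_getElem hi, List.getElem?_eq_getElem h1,
          List.getElem?_eq_getElem h2] at hmatch
      simp only [beq_iff_eq] at hmatch
      exact ⟨i, Nat.zero_le i, h2, hmatch⟩
    · exfalso
      have : l[i+2]? = none := by
        rw [List.getElem?_eq_none_iff]; omega
      rw [this] at hmatch
      rcases hget1 : l[i+1]? with _ | b
      · rw [hget1] at hmatch; simp at hmatch
      · rw [hget1, List.getElem?_eq_getElem hi] at hmatch; simp at hmatch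
  · rintro ⟨j, _, hj, hjeq⟩
    refine ⟨j, List.mem_range.mpr (by omega), ?_⟩
    rw [List.getElem?_eq_getElem (by omega : j < l.length),
        List.getElem?_eq_getElem (by omega : j + 1 < l.length),
        List.getElem?_eq_getElem hj]
    simpa using hjeq

-- ===== VERDICT (by name: the statement is the Claim_ definition above) =====
theorem check_triple_letter_pattern_spec : Claim_equal_check_triple_letter_pattern := by
  intro input _
  unfold Spec_check_triple_letter_pattern check_triple_letter_pattern check_triple_letter_pattern_alt
  rw [Bool.eq_iff_iff, checkLoopA_iff input.toList input.toList.length 0 (by omega),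
      altB_iff input.toList]
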